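-- pv_equiv track=rewrite | github.com/Lucaslgl0/Projet-Cryptologie-S2 | operations_liste.py | change_retenue
-- ===== SOURCE A (Python) =====
-- def change_retenue(L, base=10):
--     """Ajout d'une retenue lors d'une opération
--
--     Cette fonction nous permet de supprimer le problème de retenue sur nos opérations.
--
--     Args :
--         L (list): notre liste en entrée sur laquelle sera appliquée la retenue
--         base (int): Par défaut 10, permet de changer de base si nous le voulons
--
--     Return :
--         None : modifie simplement la liste
--     """
--     if len(L) == 0:
--         return [1]
--
--     else:
--         if L[-1] != (base - 1):
--             L[-1] += 1
--             return L
--         else: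
--             L[-1] = 0
--         return change_retenue(L[:-1], base) + [L[-1]]
-- ===== SOURCE B (Python) =====
-- def change_retenue(L, base=10):
--     """Same return value as A, via a single backward scan instead of
--     recursion with repeated list copies.  (A mutates L in place; B does not:
--     the equivalence claimed is about the return value only.)"""
--     i = len(L) - 1
--     while i >= 0 and L[i] == base - 1:
--         i -= 1
--     if i < 0:
--         return [1] + [0] * len(L)
--     return L[:i] + [L[i] + 1] + [0] * (len(L) - 1 - i)
-- ===== Notes on version B (the rewrite author's own statement) =====
-- stated objective: alternative
-- what changed: Replaces A's recursion that copies L[:-1] at every carry step with a single backward index scan locating the rightmost digit != base-1 and one slice-based construction of the result.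
import Mathlib
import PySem

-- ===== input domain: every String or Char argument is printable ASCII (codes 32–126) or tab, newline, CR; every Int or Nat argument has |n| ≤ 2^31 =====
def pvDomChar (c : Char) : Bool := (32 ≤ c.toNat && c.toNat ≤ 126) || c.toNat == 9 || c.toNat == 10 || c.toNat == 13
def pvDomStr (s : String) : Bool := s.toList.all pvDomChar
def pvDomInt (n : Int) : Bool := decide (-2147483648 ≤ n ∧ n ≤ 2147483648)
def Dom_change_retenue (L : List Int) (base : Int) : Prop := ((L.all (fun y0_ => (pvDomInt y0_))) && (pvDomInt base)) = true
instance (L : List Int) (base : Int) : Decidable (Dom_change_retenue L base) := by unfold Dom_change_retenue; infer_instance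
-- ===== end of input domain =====

-- B replaces A's recursion (which copies L[:-1] each carry step) with one backward scan;
-- A mutates its argument in place, B does not: the equivalence proved is about the RETURN value only.

-- ===== PORT A =====
-- literal transliteration of A: empty -> [1]; last digit != base-1 -> increment it;
-- else set it to 0 and recurse on L[:-1], appending the (now 0) last digit.
def change_retenue (L : List Int) (base : Int) : List Int :=
  if h : L = [] then [1]
  else
    if L.getLast h ≠ base - 1 then
      L.dropLast ++ [L.getLast h + 1]
    else
      change_retenue L.dropLast base ++ [0]
termination_by L.length
decreasing_by
  have : 0 < L.length := List.length_pos_iff.mpr h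
  simp only [List.length_dropLast]; omega

-- ===== PORT B =====
-- Source B's while loop: decrement i while i >= 0 and L[i] == base - 1
def altLoop (L : List Int) (base : Int) (i : Int) : Int :=
  if h : 0 ≤ i ∧ PySem.List.pyGetD L i 0 = base - 1 then
    altLoop L base (i - 1)
  else i
termination_by (i + 1).toNat
decreasing_by omega

def change_retenue_alt (L : List Int) (base : Int) : List Int :=
  let i := altLoop L base ((L.length : Int) - 1)
  if i < 0 then
    [1] ++ List.replicate L.length 0
  else
    PySem.List.slice L none (some i) ++ [PySem.List.pyGetD L i 0 + 1]
      ++ List.replicate (((L.length : Int) - 1 - i).toNat) 0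

-- ===== PRECONDITION & SPEC =====
def Spec_change_retenue (L : List Int) (base : Int) (out : List Int) : Prop := out = change_retenue_alt L base
instance (L : List Int) (base : Int) (out : List Int) : Decidable (Spec_change_retenue L base out) := by unfold Spec_change_retenue; infer_instance

-- ===== CLAIM (what is proved, stated in full; the proofs are below) =====
def Claim_equal_change_retenue : Prop := ∀ (L : List Int) (base : Int), Dom_change_retenue L base → Spec_change_retenue L base (change_retenue L base)

-- ===== LEMMAS AND PROOFS =====

-- proof-side characterisation: the carry step on the REVERSED digit list
def carryRev (base : Int) : List Int → List Int
  | [] => [1]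
  | r :: rs => if r ≠ base - 1 then (r + 1) :: rs else 0 :: carryRev base rs

theorem change_retenue_rev (base : Int) (R : List Int) :
    change_retenue R.reverse base = (carryRev base R).reverse := by
  induction R with
  | nil => rw [change_retenue]; simp [carryRev]
  | cons r rs ih =>
      rw [change_retenue]
      have hne : rs.reverse ++ [r] ≠ [] := by simp
      simp only [List.reverse_cons, dif_neg hne, List.getLast_append, List.dropLast_concat]
      by_cases hr : r = base - 1
      · simp [carryRev, hr, ih]
      · simp [carryRev, hr]

theorem altLoop_le (L : List Int) (base : Int) (i : Int) : altLoop L base i ≤ i := by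
  induction hn : (i + 1).toNat using Nat.strong_induction_on generalizing i with
  | _ n ih =>
    rw [altLoop]
    by_cases h : 0 ≤ i ∧ PySem.List.pyGetD L i 0 = base - 1
    · rw [dif_pos h]
      have := ih i.toNat (by omega) (i - 1) (by omega)
      omega
    · rw [dif_neg h]

theorem altLoop_append (L ys : List Int) (base : Int) (i : Int) (h : i < (L.length : Int)) :
    altLoop (L ++ ys) base i = altLoop L base i := by
  induction hn : (i + 1).toNat using Nat.strong_induction_on generalizing i with
  | _ n ih =>
    conv_lhs => rw [altLoop]
    conv_rhs => rw [altLoop]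
    by_cases h0 : 0 ≤ i
    · have hget : PySem.List.pyGetD (L ++ ys) i 0 = PySem.List.pyGetD L i 0 := by
        rw [PySem.List.pyGetD_eq_getElem (L ++ ys) 0 h0 (by simp only [List.length_append]; push_cast; omega),
            PySem.List.pyGetD_eq_getElem L 0 h0 (by omega)]
        exact List.getElem_append_left (by omega)
      rw [hget]
      by_cases hc : PySem.List.pyGetD L i 0 = base - 1
      · rw [dif_pos ⟨h0, hc⟩, dif_pos ⟨h0, hc⟩]
        exact ih i.toNat (by omega) (i - 1) (by omega) (by omega)
      · rw [dif_neg (by tauto), dif_neg (by tauto)]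
    · rw [dif_neg (by tauto), dif_neg (by tauto)]

theorem change_retenue_alt_rev (base : Int) (R : List Int) :
    change_retenue_alt R.reverse base = (carryRev base R).reverse := by
  induction R with
  | nil =>
      simp only [List.reverse_nil, change_retenue_alt, carryRev]
      rw [altLoop]
      norm_num
  | cons r rs ih =>
      have hlen : ((rs.reverse ++ [r]).length : Int) - 1 = (rs.length : Int) := by
        simp
      have hget : PySem.List.pyGetD (rs.reverse ++ [r]) (rs.length : Int) 0 = r := by
        rw [PySem.List.pyGetD_eq_getElem (rs.reverse ++ [r]) 0 (by omega)
              (by simp only [List.length_append, List.length_reverse,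
                List.length_cons, List.length_nil]; push_cast; omega)]
        simp only [Int.toNat_natCast]
        rw [List.getElem_append_right (by simp)]
        simp
      by_cases hr : r = base - 1
      · -- carry propagates: the scan steps past r and behaves as on rs.reverse
        have hstep : altLoop (rs.reverse ++ [r]) base ((rs.length : Int)) =
            altLoop rs.reverse base ((rs.length : Int) - 1) := by
          rw [altLoop, dif_pos ⟨by omega, by rw [hget, hr]⟩]
          exact altLoop_append rs.reverse [r] base _ (by simp only [List.length_reverse]; omega)
        set j := altLoop rs.reverse base ((rs.length : Int) - 1) with hj
        have hjle : j ≤ (rs.length : Int) - 1 := altLoop_le _ _ _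
        have halt : change_retenue_alt rs.reverse base = (carryRev base rs).reverse := ih
        simp only [change_retenue_alt, List.length_reverse, ← hj] at halt
        simp only [List.reverse_cons, change_retenue_alt, hlen, hstep]
        by_cases hjneg : j < 0
        · rw [if_pos hjneg]
          rw [if_pos hjneg] at halt
          rw [show carryRev base (r :: rs) = 0 :: carryRev base rs from by simp [carryRev, hr]]
          rw [List.reverse_cons, ← halt]
          simp [List.replicate_succ']
        · rw [if_neg hjneg]
          rw [if_neg hjneg] at halt
          have hsl : PySem.List.slice (rs.reverse ++ [r]) none (some j) =
              PySem.List.slice rs.reverse none (some j) := by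
            rw [PySem.List.slice_to _ (by omega), PySem.List.slice_to _ (by omega)]
            exact List.take_append_of_le_length (by simp only [List.length_reverse]; omega)
          have hg2 : PySem.List.pyGetD (rs.reverse ++ [r]) j 0 =
              PySem.List.pyGetD rs.reverse j 0 := by
            rw [PySem.List.pyGetD_eq_getElem (rs.reverse ++ [r]) 0 (by omega)
                  (by simp only [List.length_append, List.length_reverse,
                    List.length_cons, List.length_nil]; push_cast; omega),
                PySem.List.pyGetD_eq_getElem rs.reverse 0 (by omega)
                  (by simp only [List.length_reverse]; omega)]
            exact List.getElem_append_left (by simp only [List.length_reverse]; omega)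
          have hrep : (((rs.length : Int)) - j).toNat =
              ((rs.length : Int) - 1 - j).toNat + 1 := by omega
          rw [show carryRev base (r :: rs) = 0 :: carryRev base rs from by simp [carryRev, hr]]
          rw [hsl, hg2, hrep, List.replicate_succ', List.reverse_cons, ← halt]
          simp [List.append_assoc]
      · -- no carry: the scan stops at the last digit immediately
        have hstop : altLoop (rs.reverse ++ [r]) base ((rs.length : Int)) = (rs.length : Int) := by
          rw [altLoop, dif_neg (by rw [hget]; tauto)]
        simp only [List.reverse_cons, change_retenue_alt, hlen, hstop]
        rw [if_neg (by omega), hget, PySem.List.slice_to _ (by omega)]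
        rw [show carryRev base (r :: rs) = (r + 1) :: rs from by simp [carryRev, hr]]
        simp

-- ===== VERDICT (by name: the statement is the Claim_ definition above) =====
theorem change_retenue_spec : Claim_equal_change_retenue := by
  intro L base _
  unfold Spec_change_retenue
  have h1 := change_retenue_rev base L.reverse
  have h2 := change_retenue_alt_rev base L.reverse
  rw [List.reverse_reverse] at h1 h2
  rw [h1, h2]
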